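-- pv_equiv track=rewrite | github.com/Semeriuss/A2SV-Labs | 43. balancedTeam.py | maxBalancedTeam
-- ===== SOURCE A (Python) =====
-- def maxBalancedTeam(skills):
--
--     skills.sort()
--
--     n = len(skills)
--     startPointer, endPointer, maxTeams = 0, 0, 0
--
--     while endPointer < n:
--         if skills[endPointer] - skills[startPointer] > 5:
--             startPointer += 1
--         else:
--             endPointer += 1
--             maxTeams = max(endPointer - startPointer, maxTeams)
--
--     return maxTeams
-- ===== SOURCE B (Python) =====
-- def maxBalancedTeam(skills):
--     skills.sort()
--     best = 0
--     for e in range(len(skills)):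
--         target = skills[e] - 5
--         lo, hi = 0, e
--         while lo < hi:
--             mid = (lo + hi) // 2
--             if skills[mid] < target:
--                 lo = mid + 1
--             else:
--                 hi = mid
--         if e - lo + 1 > best:
--             best = e - lo + 1
--     return best
-- ===== Notes on version B (the rewrite author's own statement) =====
-- stated objective: alternative
-- what changed: Replaces A's co-moving two-pointer sliding window with, for each end index, a hand-written binary search for the leftmost index whose value is within 5 of the end value, taking the maximum of the resulting window sizes.
import Mathlib
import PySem

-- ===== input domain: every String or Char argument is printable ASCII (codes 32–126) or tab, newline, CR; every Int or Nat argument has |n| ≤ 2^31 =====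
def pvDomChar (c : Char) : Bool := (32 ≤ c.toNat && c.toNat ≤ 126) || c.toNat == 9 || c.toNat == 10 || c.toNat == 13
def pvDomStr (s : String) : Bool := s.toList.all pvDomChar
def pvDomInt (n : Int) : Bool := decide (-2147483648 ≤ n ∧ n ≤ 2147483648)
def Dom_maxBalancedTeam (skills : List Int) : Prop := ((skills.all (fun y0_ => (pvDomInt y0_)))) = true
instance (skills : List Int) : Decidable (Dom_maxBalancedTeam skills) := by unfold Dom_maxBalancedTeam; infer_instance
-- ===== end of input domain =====

-- B replaces A's co-moving two-pointer window by, per end index, a hand-written binary search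
-- for the leftmost index within range 5 (objective: alternative decomposition; equivalence is
-- about the return value — both A and B sort the argument list in place).

-- ===== PORT A =====
-- the while loop: state (startPointer, endPointer, maxTeams); fuel 2*n+1 always suffices
-- (each iteration increases startPointer + endPointer, which stays ≤ 2*n)
def pvLoopA (s : List Int) (n : Int) : Nat → Int → Int → Int → Int
  | 0, _, _, m => m
  | fuel+1, st, en, m =>
    if en < n then
      if PySem.List.pyGetD s en 0 - PySem.List.pyGetD s st 0 > 5 then
        pvLoopA s n fuel (st+1) en m
      else
        pvLoopA s n fuel st (en+1) (max (en+1-st) m)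
    else m

def maxBalancedTeam (skills : List Int) : Int :=
  let s := PySem.List.sorted skills (fun x => x) false
  pvLoopA s (PySem.List.len s) (2 * s.length + 1) 0 0 0

-- ===== PORT B =====
-- the inner while loop of Source B (binary search on [lo,hi)); fuel e+1 always suffices
-- (hi - lo shrinks every iteration and starts at e)
def pvBisect (s : List Int) (target : Int) : Nat → Int → Int → Int
  | 0, lo, _ => lo
  | fuel+1, lo, hi =>
    if lo < hi then
      let mid := PySem.Int.floordiv (lo + hi) 2
      if PySem.List.pyGetD s mid 0 < target then pvBisect s target fuel (mid+1) hi
      else pvBisect s target fuel lo mid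
    else lo

def maxBalancedTeam_alt (skills : List Int) : Int :=
  let s := PySem.List.sorted skills (fun x => x) false
  (PySem.List.pyRange 0 (PySem.List.len s) 1).foldl (fun best e =>
    let target := PySem.List.pyGetD s e 0 - 5
    let lo := pvBisect s target (e.toNat + 1) 0 e
    if e - lo + 1 > best then e - lo + 1 else best) 0

-- ===== PRECONDITION & SPEC =====
def Spec_maxBalancedTeam (skills : List Int) (out : Int) : Prop := out = maxBalancedTeam_alt skills
instance (skills : List Int) (out : Int) : Decidable (Spec_maxBalancedTeam skills out) := by unfold Spec_maxBalancedTeam; infer_instance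

-- ===== CLAIM (what is proved, stated in full; the proofs are below) =====
def Claim_equal_maxBalancedTeam : Prop := ∀ (skills : List Int), Dom_maxBalancedTeam skills → Spec_maxBalancedTeam skills (maxBalancedTeam skills)

-- ===== LEMMAS AND PROOFS =====

-- least index i with s[e] - s[i] ≤ 5 (exists: i = e works)
def pvLf (s : List Int) (e : Nat) : Nat :=
  Nat.find (p := fun i => s.getD e 0 - s.getD i 0 ≤ 5 ∨ e ≤ i) ⟨e, Or.inr le_rfl⟩

-- the common reference: fold of max (e + 1 - pvLf e) over e = j .. n-1
def pvSpecF (s : List Int) (n : Nat) (j : Nat) (m : Int) : Int :=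
  if j < n then pvSpecF s n (j+1) (max ((j:Int) + 1 - (pvLf s j : Int)) m) else m
termination_by n - j

theorem pvLf_le_self (s : List Int) (e : Nat) : pvLf s e ≤ e :=
  Nat.find_le (Or.inr le_rfl)

theorem pvLf_lt (s : List Int) (e i : Nat) (h : i < pvLf s e) :
    5 < s.getD e 0 - s.getD i 0 ∧ i < e := by
  have := Nat.find_min (p := fun i => s.getD e 0 - s.getD i 0 ≤ 5 ∨ e ≤ i) ⟨e, Or.inr le_rfl⟩ h
  push Not at this
  omega

theorem pvLf_holds (s : List Int) (e : Nat) : s.getD e 0 - s.getD (pvLf s e) 0 ≤ 5 := by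
  have h := Nat.find_spec (p := fun i => s.getD e 0 - s.getD i 0 ≤ 5 ∨ e ≤ i) ⟨e, Or.inr le_rfl⟩
  rcases h with h | h
  · exact h
  · have := pvLf_le_self s e
    have : pvLf s e = e := le_antisymm this h
    rw [this]; omega

theorem pvLf_le_of (s : List Int) (e i : Nat) (h : s.getD e 0 - s.getD i 0 ≤ 5) : pvLf s e ≤ i :=
  Nat.find_le (Or.inl h)

-- monotonicity of getD on a sorted list
theorem pv_sorted_getD_mono (s : List Int) (hs : s.Pairwise (· ≤ ·)) (p q : Nat)
    (hpq : p ≤ q) (hq : q < s.length) : s.getD p 0 ≤ s.getD q 0 := by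
  have hp : p < s.length := lt_of_le_of_lt hpq hq
  rw [List.getD_eq_getElem s 0 hp, List.getD_eq_getElem s 0 hq]
  rcases eq_or_lt_of_le hpq with rfl | hlt
  · exact le_rfl
  · exact List.pairwise_iff_getElem.mp hs p q hp hq hlt

theorem pvLf_mono (s : List Int) (hs : s.Pairwise (· ≤ ·)) (e e' : Nat)
    (hee : e ≤ e') (he' : e' < s.length) : pvLf s e ≤ pvLf s e' := by
  by_contra hcon
  push Not at hcon
  have h1 := pvLf_lt s e (pvLf s e') hcon
  have h2 := pvLf_holds s e'
  have h3 : s.getD e 0 ≤ s.getD e' 0 := pv_sorted_getD_mono s hs e e' hee he'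
  omega

-- binary-search correctness on a sorted list
theorem pvBisect_correct (s : List Int) (hs : s.Pairwise (· ≤ ·)) (t : Int) :
    ∀ (fuel : Nat) (lo hi : Int), 0 ≤ lo → lo ≤ hi → hi ≤ (s.length : Int) →
    (hi - lo).toNat ≤ fuel →
    (∀ i : Nat, (i : Int) < lo → s.getD i 0 < t) →
    (∀ i : Nat, hi ≤ (i : Int) → i < s.length → t ≤ s.getD i 0) →
    ∃ r : Nat, pvBisect s t fuel lo hi = (r : Int) ∧ (r : Int) ≤ hi ∧
      (∀ i : Nat, i < r → s.getD i 0 < t) ∧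
      (∀ i : Nat, r ≤ i → i < s.length → t ≤ s.getD i 0) := by
  intro fuel
  induction fuel with
  | zero =>
    intro lo hi h0 hlh hhn hf hlow hhigh
    have : lo = hi := by omega
    subst this
    refine ⟨lo.toNat, ?_, by omega,
      fun i hi' => hlow i (by omega), fun i hi' hlen => hhigh i (by omega) hlen⟩
    simp [pvBisect]; omega
  | succ fuel ih =>
    intro lo hi h0 hlh hhn hf hlow hhigh
    by_cases hcase : lo < hi
    · have hmid := PySem.Int.floordiv_two_mid_bounds (le_of_lt hcase)
      have hmidlt : PySem.Int.floordiv (lo + hi) 2 < hi := by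
        rw [PySem.Int.floordiv_lt_iff_lt_mul (by norm_num : (0:Int) < 2)]
        omega
      have hmidrange : (PySem.Int.floordiv (lo + hi) 2).toNat < s.length := by omega
      have hmidcast : (((PySem.Int.floordiv (lo + hi) 2).toNat : Nat) : Int)
          = PySem.Int.floordiv (lo + hi) 2 := by omega
      have hget : PySem.List.pyGetD s (PySem.Int.floordiv (lo + hi) 2) 0
          = s.getD (PySem.Int.floordiv (lo + hi) 2).toNat 0 := by
        conv_lhs => rw [← hmidcast]
        rw [PySem.List.pyGetD_natCast]
      by_cases hb : PySem.List.pyGetD s (PySem.Int.floordiv (lo + hi) 2) 0 < t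
      · have hres : pvBisect s t (fuel+1) lo hi
            = pvBisect s t fuel (PySem.Int.floordiv (lo + hi) 2 + 1) hi := by
          simp only [pvBisect]
          rw [if_pos hcase, if_pos hb]
        rw [hres]
        apply ih (PySem.Int.floordiv (lo + hi) 2 + 1) hi (by omega) (by omega) hhn (by omega)
        · intro i hi'
          rcases lt_or_ge (i : Int) lo with h | h
          · exact hlow i h
          · have : s.getD i 0 ≤ s.getD (PySem.Int.floordiv (lo + hi) 2).toNat 0 :=
              pv_sorted_getD_mono s hs i (PySem.Int.floordiv (lo + hi) 2).toNat (by omega) hmidrange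
            rw [hget] at hb; omega
        · exact hhigh
      · have hres : pvBisect s t (fuel+1) lo hi
            = pvBisect s t fuel lo (PySem.Int.floordiv (lo + hi) 2) := by
          simp only [pvBisect]
          rw [if_pos hcase, if_neg hb]
        obtain ⟨r, hr1, hr2, hr3, hr4⟩ :=
          ih lo (PySem.Int.floordiv (lo + hi) 2) h0 (by omega) (by omega) (by omega) hlow
          (fun i hmi hlen => by
            have : s.getD (PySem.Int.floordiv (lo + hi) 2).toNat 0 ≤ s.getD i 0 :=
              pv_sorted_getD_mono s hs (PySem.Int.floordiv (lo + hi) 2).toNat i (by omega) hlen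
            rw [hget] at hb; omega)
        exact ⟨r, by rw [hres]; exact hr1, by omega, hr3, hr4⟩
    · have hstop : pvBisect s t (fuel+1) lo hi = lo := by simp [pvBisect, hcase]
      have hlohi : lo = hi := by omega
      subst hlohi
      refine ⟨lo.toNat, ?_, by omega,
        fun i hi' => hlow i (by omega), fun i hi' hlen => hhigh i (by omega) hlen⟩
      rw [hstop]; omega

-- A's two-pointer loop computes pvSpecF
theorem pvLoopA_eq (s : List Int) (hs : s.Pairwise (· ≤ ·)) :
    ∀ (fuel i j : Nat) (m : Int), i ≤ j → j ≤ s.length → (j < s.length → i ≤ pvLf s j) →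
    2 * s.length + 1 - i - j ≤ fuel →
    pvLoopA s (s.length : Int) fuel (i : Int) (j : Int) m = pvSpecF s s.length j m := by
  intro fuel
  induction fuel with
  | zero => intro i j m hij hjn _ hf; omega
  | succ fuel ih =>
    intro i j m hij hjn hiL hf
    by_cases hjlt : j < s.length
    · have hcast : ((j : Int) < (s.length : Int)) := by exact_mod_cast hjlt
      have hgj : PySem.List.pyGetD s (j : Int) 0 = s.getD j 0 := PySem.List.pyGetD_natCast ..
      have hgi : PySem.List.pyGetD s (i : Int) 0 = s.getD i 0 := PySem.List.pyGetD_natCast ..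
      by_cases hb : PySem.List.pyGetD s (j : Int) 0 - PySem.List.pyGetD s (i : Int) 0 > 5
      · have hres : pvLoopA s (s.length : Int) (fuel+1) (i:Int) (j:Int) m
            = pvLoopA s (s.length : Int) fuel ((i:Int)+1) (j:Int) m := by
          simp only [pvLoopA]
          rw [if_pos hcast, if_pos hb]
        have hiLj : i ≤ pvLf s j := hiL hjlt
        have hine : i ≠ pvLf s j := by
          intro heq
          have := pvLf_holds s j
          rw [← heq] at this
          rw [hgj, hgi] at hb
          omega
        have hilt : i < pvLf s j := lt_of_le_of_ne hiLj hine
        have hile : i + 1 ≤ j := by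
          have := pvLf_le_self s j
          omega
        rw [hres]
        have hstep := ih (i+1) j m hile hjn (fun _ => hilt) (by omega)
        push_cast at hstep
        exact hstep
      · have hres : pvLoopA s (s.length : Int) (fuel+1) (i:Int) (j:Int) m
            = pvLoopA s (s.length : Int) fuel (i:Int) ((j:Int)+1) (max ((j:Int)+1-(i:Int)) m) := by
          simp only [pvLoopA]
          rw [if_pos hcast, if_neg hb]
        have hieq : i = pvLf s j := by
          have h1 : pvLf s j ≤ i := by
            apply pvLf_le_of
            rw [hgj, hgi] at hb
            omega
          omega
        rw [hres]
        conv_rhs => rw [pvSpecF]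
        rw [if_pos hjlt, ← hieq]
        have hstep := ih i (j+1) (max ((j:Int)+1-(i:Int)) m) (by omega) (by omega)
          (fun hj1 => by rw [hieq]; exact pvLf_mono s hs j (j+1) (by omega) hj1) (by omega)
        push_cast at hstep
        exact hstep
    · have hj : j = s.length := by omega
      subst hj
      simp only [pvLoopA]
      rw [if_neg (lt_irrefl _), pvSpecF, if_neg (lt_irrefl _)]

-- B's fold computes pvSpecF
theorem pvFoldB_eq (s : List Int) (hs : s.Pairwise (· ≤ ·)) :
    ∀ (k : Nat) (j : Nat) (m : Int), j ≤ s.length → s.length - j ≤ k →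
    (PySem.List.pyRange (j : Int) (s.length : Int) 1).foldl (fun best e =>
      let target := PySem.List.pyGetD s e 0 - 5
      let lo := pvBisect s target (e.toNat + 1) 0 e
      if e - lo + 1 > best then e - lo + 1 else best) m = pvSpecF s s.length j m := by
  intro k
  induction k with
  | zero =>
    intro j m hjn hk
    have : j = s.length := by omega
    subst this
    rw [PySem.List.pyRange_one_eq_nil (le_refl _), pvSpecF]
    simp
  | succ k ih =>
    intro j m hjn hk
    by_cases hjlt : j < s.length
    · have hcast : ((j : Int) < (s.length : Int)) := by exact_mod_cast hjlt
      rw [PySem.List.pyRange_one_cons hcast, List.foldl_cons]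
      have hgj : PySem.List.pyGetD s (j : Int) 0 = s.getD j 0 := PySem.List.pyGetD_natCast ..
      obtain ⟨r, hr, hrle, hrlow, hrhigh⟩ := pvBisect_correct s hs (s.getD j 0 - 5)
        ((j:Int).toNat + 1) 0 (j : Int) (le_refl 0) (by omega) (by exact_mod_cast le_of_lt hjlt)
        (by omega)
        (fun i hi' => absurd hi' (by omega))
        (fun i hji hlen => by
          have : s.getD j 0 ≤ s.getD i 0 := pv_sorted_getD_mono s hs j i (by exact_mod_cast hji) hlen
          omega)
      have hreq : r = pvLf s j := by
        have h1 : pvLf s j ≤ r := by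
          apply pvLf_le_of
          have hrlen : r < s.length := by omega
          have := hrhigh r (le_refl r) hrlen
          omega
        have h2 : ¬ (pvLf s j < r) := by
          intro hlt
          have := hrlow (pvLf s j) hlt
          have := pvLf_holds s j
          omega
        omega
      rw [hreq] at hr
      simp only [hgj, hr]
      have hacc : (if (j:Int) - (pvLf s j : Int) + 1 > m then (j:Int) - (pvLf s j : Int) + 1 else m)
          = max ((j:Int) + 1 - (pvLf s j : Int)) m := by
        rw [max_def]
        split_ifs <;> omega
      rw [hacc]
      have hih := ih (j+1) (max ((j:Int) + 1 - (pvLf s j : Int)) m) (by omega) (by omega)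
      push_cast at hih
      rw [hih]
      conv_rhs => rw [pvSpecF]
      rw [if_pos hjlt]
    · have : j = s.length := by omega
      subst this
      rw [PySem.List.pyRange_one_eq_nil (le_refl _), pvSpecF]
      simp

-- ===== VERDICT (by name: the statement is the Claim_ definition above) =====
theorem maxBalancedTeam_spec : Claim_equal_maxBalancedTeam := by
  intro skills _
  unfold Spec_maxBalancedTeam maxBalancedTeam maxBalancedTeam_alt
  simp only [PySem.List.len_eq]
  have hs : (PySem.List.sorted skills (fun x => x) false).Pairwise (· ≤ ·) :=
    PySem.List.sorted_pairwise skills (fun x => x)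
  have h1 := pvLoopA_eq (PySem.List.sorted skills (fun x => x) false) hs
    (2 * (PySem.List.sorted skills (fun x => x) false).length + 1) 0 0 0
    (le_refl 0) (Nat.zero_le _) (fun _ => Nat.zero_le _) (by omega)
  have h2 := pvFoldB_eq (PySem.List.sorted skills (fun x => x) false) hs
    (PySem.List.sorted skills (fun x => x) false).length 0 0 (Nat.zero_le _) (by omega)
  simp only [Nat.cast_zero] at h1 h2
  rw [h1, ← h2]
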